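-- pv_equiv track=rewrite | github.com/holEeast979/On-Device-LMM-Reasoning-Acceleration | fasteromni/eval_mvbench.py | _find_answer_index
-- ===== SOURCE A (Python) =====
-- from typing import Dict, List, Optional, Tuple
--
-- def _find_answer_index(answer_text: str, candidates: List[str]) -> Optional[int]:
--     """先精确匹配，再做 strip 匹配，返回候选项索引。"""
--     for i, c in enumerate(candidates):
--         if c == answer_text:
--             return i
--     norm = answer_text.strip()
--     for i, c in enumerate(candidates):
--         if c.strip() == norm:
--             return i
--     return None
-- ===== SOURCE B (Python) =====
-- from typing import List, Optional
--
-- def _find_answer_index(answer_text: str, candidates: List[str]) -> Optional[int]: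
--     """Single pass: record first exact and first stripped match, decide after the scan."""
--     norm = answer_text.strip()
--     first_exact = None
--     first_strip = None
--     for i, c in enumerate(candidates):
--         if first_exact is None and c == answer_text:
--             first_exact = i
--         if first_strip is None and c.strip() == norm:
--             first_strip = i
--     return first_exact if first_exact is not None else first_strip
-- ===== Notes on version B (the rewrite author's own statement) =====
-- stated objective: alternative
-- what changed: Replaces A's two sequential scans (exact first, then stripped) by a single enumerate pass that records the first exact and first stripped match in two variables and decides after the loop.
import Mathlib
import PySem

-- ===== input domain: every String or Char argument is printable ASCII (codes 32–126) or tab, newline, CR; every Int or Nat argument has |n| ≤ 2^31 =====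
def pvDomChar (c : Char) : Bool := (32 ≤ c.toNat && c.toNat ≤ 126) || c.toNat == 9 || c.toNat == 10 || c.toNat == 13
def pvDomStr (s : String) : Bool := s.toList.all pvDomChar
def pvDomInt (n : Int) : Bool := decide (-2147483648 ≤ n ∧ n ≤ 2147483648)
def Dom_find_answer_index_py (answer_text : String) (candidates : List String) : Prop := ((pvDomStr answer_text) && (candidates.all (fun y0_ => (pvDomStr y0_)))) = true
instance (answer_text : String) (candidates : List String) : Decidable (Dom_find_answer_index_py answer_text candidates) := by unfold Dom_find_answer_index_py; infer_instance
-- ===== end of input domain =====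

-- B replaces A's two sequential scans by one enumerate pass keeping the first exact
-- and first stripped match, deciding after the loop (objective: alternative decomposition).

-- ===== PORT A =====
-- first loop of A: first i with c == answer_text
def pvFindExact (answer_text : String) : Int → List String → Option Int
  | _, [] => none
  | i, c :: cs => if c = answer_text then some i else pvFindExact answer_text (i + 1) cs

-- second loop of A: first i with c.strip() == norm
def pvFindStrip (norm : String) : Int → List String → Option Int
  | _, [] => none
  | i, c :: cs => if PySem.Str.strip c = norm then some i else pvFindStrip norm (i + 1) cs

def find_answer_index_py (answer_text : String) (candidates : List String) : Option Int :=
  match pvFindExact answer_text 0 candidates with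
  | some i => some i
  | none => pvFindStrip (PySem.Str.strip answer_text) 0 candidates

-- ===== PORT B =====
-- B's single loop: two accumulators, each set only once
def pvScan (answer_text norm : String) : Int → Option Int → Option Int → List String → Option Int × Option Int
  | _, fe, fs, [] => (fe, fs)
  | i, fe, fs, c :: cs =>
      let fe' := if fe = none ∧ c = answer_text then some i else fe
      let fs' := if fs = none ∧ PySem.Str.strip c = norm then some i else fs
      pvScan answer_text norm (i + 1) fe' fs' cs

def find_answer_index_py_alt (answer_text : String) (candidates : List String) : Option Int :=
  let norm := PySem.Str.strip answer_text
  let r := pvScan answer_text norm 0 none none candidates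
  match r.1 with
  | some i => some i
  | none => r.2

-- ===== PRECONDITION & SPEC =====
def Spec_find_answer_index_py (answer_text : String) (candidates : List String) (out : Option Int) : Prop := out = find_answer_index_py_alt answer_text candidates
instance (answer_text : String) (candidates : List String) (out : Option Int) : Decidable (Spec_find_answer_index_py answer_text candidates out) := by unfold Spec_find_answer_index_py; infer_instance

-- ===== CLAIM (what is proved, stated in full; the proofs are below) =====
def Claim_equal_find_answer_index_py : Prop := ∀ (answer_text : String) (candidates : List String), Dom_find_answer_index_py answer_text candidates → Spec_find_answer_index_py answer_text candidates (find_answer_index_py answer_text candidates)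

-- ===== LEMMAS AND PROOFS =====
-- the single pass computes exactly the two sequential first-match searches
theorem pvScan_eq (answer_text norm : String) (cs : List String) :
    ∀ (i : Int) (fe fs : Option Int),
      pvScan answer_text norm i fe fs cs =
        ((match fe with | some j => some j | none => pvFindExact answer_text i cs),
         (match fs with | some j => some j | none => pvFindStrip norm i cs)) := by
  induction cs with
  | nil =>
      intro i fe fs
      cases fe <;> cases fs <;> simp [pvScan, pvFindExact, pvFindStrip]
  | cons c cs ih =>
      intro i fe fs
      simp only [pvScan, ih]
      cases fe <;> cases fs <;>
        simp [pvFindExact, pvFindStrip] <;> split_ifs <;> simp_all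

-- ===== VERDICT (by name: the statement is the Claim_ definition above) =====
theorem find_answer_index_py_spec : Claim_equal_find_answer_index_py := by
  intro answer_text candidates _
  unfold Spec_find_answer_index_py find_answer_index_py find_answer_index_py_alt
  simp only [pvScan_eq]
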